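-- pv_equiv track=rewrite | github.com/enpasos/jax2onnx | scripts/generate_migration_status.py | canonical_context
-- ===== SOURCE A (Python) =====
-- def canonical_context(context: str) -> str:
--     remaps = {
--         "examples2": "examples",
--         "primitives2": "primitives",
--         "extra_tests2": "extra_tests",
--     }
--     if context in remaps:
--         return remaps[context]
--     for prefix in ("examples2.", "primitives2.", "extra_tests2."):
--         if context.startswith(prefix):
--             base = remaps[prefix[:-1]]
--             suffix = context[len(prefix) :]
--             return f"{base}.{suffix}" if suffix else base
--     return context
-- ===== SOURCE B (Python) =====
-- def canonical_context(context: str) -> str: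
--     remap = {
--         "examples2": "examples",
--         "primitives2": "primitives",
--         "extra_tests2": "extra_tests",
--     }
--     head, _sep, rest = context.partition(".")
--     base = remap.get(head)
--     if base is None:
--         return context
--     return f"{base}.{rest}" if rest else base
-- ===== Notes on version B (the rewrite author's own statement) =====
-- stated objective: simpler
-- what changed: B replaces A's exact-match test plus scan over the three dotted prefixes (with slicing on a hit) by a single partition of the input at its first dot followed by one dictionary lookup of the head.
import Mathlib
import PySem

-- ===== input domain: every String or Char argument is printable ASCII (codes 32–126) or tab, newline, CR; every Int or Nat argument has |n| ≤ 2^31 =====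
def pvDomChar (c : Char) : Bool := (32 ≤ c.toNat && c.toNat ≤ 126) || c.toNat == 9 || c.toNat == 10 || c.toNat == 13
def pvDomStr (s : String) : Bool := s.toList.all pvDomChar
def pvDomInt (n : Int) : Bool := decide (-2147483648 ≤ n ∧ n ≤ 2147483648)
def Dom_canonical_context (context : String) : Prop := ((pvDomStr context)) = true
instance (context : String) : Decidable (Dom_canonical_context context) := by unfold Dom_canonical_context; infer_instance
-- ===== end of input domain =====

-- B replaces A's scan over the three dotted prefixes by a single partition at the first '.'
-- followed by one dictionary lookup of the head (objective: simpler).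

-- ===== PORT A =====
def canonical_context_remaps : PySem.Dict String String :=
  PySem.Dict.ofList
    [("examples2", "examples"), ("primitives2", "primitives"), ("extra_tests2", "extra_tests")]

-- the 'for prefix in (…)' loop with its early returns
def canonical_context_loop (context : String) : List String → String
  | [] => context
  | p :: ps =>
    if PySem.Str.startswith context p then
      -- remaps[prefix[:-1]]: the key is always present, so the KeyError default is unreachable
      let base := (canonical_context_remaps.get? (PySem.Str.slice p none (some (-1)))).getD ""
      let suffix := PySem.Str.slice context (some (PySem.Str.len p)) none
      -- f"{base}.{suffix}" if suffix else base
      if suffix ≠ "" then PySem.Str.join "" [base, ".", suffix] else base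
    else canonical_context_loop context ps

def canonical_context (context : String) : String :=
  if canonical_context_remaps.contains context then
    (canonical_context_remaps.get? context).getD ""   -- remaps[context]; key present here
  else
    canonical_context_loop context ["examples2.", "primitives2.", "extra_tests2."]

-- ===== PORT B =====
-- context.partition('.') ported by hand as the span at the first '.' (exact for a
-- one-character separator): head = chars before the first '.', rest = chars after it
-- (rest = [] when there is no '.' or nothing follows it; the sep component is unused in Source B).
def canonical_context_alt (context : String) : String :=
  let cs := context.toList
  let head := String.ofList (cs.takeWhile (fun c => c ≠ '.'))
  let rest := (cs.dropWhile (fun c => c ≠ '.')).drop 1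
  let remap : PySem.Dict String String :=
    PySem.Dict.ofList
      [("examples2", "examples"), ("primitives2", "primitives"), ("extra_tests2", "extra_tests")]
  match remap.get? head with
  | none => context
  | some base =>
    -- f"{base}.{rest}" if rest else base
    if rest ≠ [] then String.ofList (base.toList ++ '.' :: rest) else base

-- ===== PRECONDITION & SPEC =====
def Spec_canonical_context (context : String) (out : String) : Prop := out = canonical_context_alt context
instance (context : String) (out : String) : Decidable (Spec_canonical_context context out) := by unfold Spec_canonical_context; infer_instance

-- ===== CLAIM (what is proved, stated in full; the proofs are below) =====
def Claim_equal_canonical_context : Prop := ∀ (context : String), Dom_canonical_context context → Spec_canonical_context context (canonical_context context)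

-- ===== LEMMAS AND PROOFS =====

-- span at the first '.' of pre ++ '.' :: r, when pre holds no '.'
lemma canonical_span_take (pre r : List Char) (hnd : pre.all (fun c => c ≠ '.') = true) :
    (pre ++ '.' :: r).takeWhile (fun c => c ≠ '.') = pre := by
  induction pre with
  | nil => simp
  | cons c t ih =>
    simp only [List.all_cons, Bool.and_eq_true] at hnd
    simp only [List.cons_append, List.takeWhile_cons, hnd.1, if_true, ih hnd.2]

lemma canonical_span_drop (pre r : List Char) (hnd : pre.all (fun c => c ≠ '.') = true) :
    (pre ++ '.' :: r).dropWhile (fun c => c ≠ '.') = '.' :: r := by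
  induction pre with
  | nil => simp
  | cons c t ih =>
    simp only [List.all_cons, Bool.and_eq_true] at hnd
    simp only [List.cons_append, List.dropWhile_cons, hnd.1, if_true, ih hnd.2]

lemma canonical_join (base : String) (r : List Char) :
    PySem.Str.join "" [base, ".", String.ofList r] = String.ofList (base.toList ++ '.' :: r) := by
  rw [← String.toList_inj, PySem.Str.toList_join, String.toList_ofList]
  simp [PySem.Chars.join, List.intercalate]

lemma canonical_loop_hit (context p : String) (ps : List String) (r : List Char)
    (hcs : context.toList = p.toList ++ r)
    (hst : PySem.Str.startswith context p = true) :
    canonical_context_loop context (p :: ps) =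
      (if r ≠ [] then
        PySem.Str.join "" [(canonical_context_remaps.get? (PySem.Str.slice p none (some (-1)))).getD "", ".", String.ofList r]
       else (canonical_context_remaps.get? (PySem.Str.slice p none (some (-1)))).getD "") := by
  have hsuf : PySem.Str.slice context (some (PySem.Str.len p)) none = String.ofList r := by
    rw [← String.toList_inj, PySem.Str.toList_slice, String.toList_ofList]
    simp only [PySem.Chars.slice_eq_listSlice, PySem.Str.len]
    rw [hcs]
    simp
  simp only [canonical_context_loop, hst, if_true, hsuf]
  apply if_congr _ rfl rfl
  simp only [ne_eq, not_iff_not]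
  constructor
  · intro h; have := congrArg String.toList h; simpa using this
  · intro h; subst h; rfl

lemma canonical_loop_miss (context p : String) (ps : List String)
    (h : PySem.Str.startswith context p = false) :
    canonical_context_loop context (p :: ps) = canonical_context_loop context ps := by
  simp only [canonical_context_loop, h, Bool.false_eq_true, if_false]

lemma canonical_alt_hit (context pre base : String) (r : List Char)
    (hnd : pre.toList.all (fun c => c ≠ '.') = true)
    (hcs : context.toList = pre.toList ++ '.' :: r)
    (hget : (PySem.Dict.ofList
        [("examples2", "examples"), ("primitives2", "primitives"), ("extra_tests2", "extra_tests")]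
        : PySem.Dict String String).get? pre = some base) :
    canonical_context_alt context = if r ≠ [] then String.ofList (base.toList ++ '.' :: r) else base := by
  unfold canonical_context_alt
  simp only [hcs, canonical_span_take pre.toList r hnd, canonical_span_drop pre.toList r hnd,
    String.ofList_toList, hget, List.drop_succ_cons, List.drop_zero]

lemma canonical_alt_id (context : String)
    (hget : (PySem.Dict.ofList
        [("examples2", "examples"), ("primitives2", "primitives"), ("extra_tests2", "extra_tests")]
        : PySem.Dict String String).get?
        (String.ofList (context.toList.takeWhile (fun c => c ≠ '.'))) = none) :
    canonical_context_alt context = context := by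
  unfold canonical_context_alt
  simp only [hget]

lemma canonical_span_cases (context key : String)
    (heq : key.toList = context.toList.takeWhile (fun c => c ≠ '.')) :
    context = key ∨ ∃ r, context.toList = key.toList ++ '.' :: r := by
  have hsplit := List.takeWhile_append_dropWhile (p := fun c => decide (c ≠ '.')) (l := context.toList)
  rcases hd : context.toList.dropWhile (fun c => c ≠ '.') with _ | ⟨c, r⟩
  · left
    apply String.toList_inj.1
    rw [hd, ← heq] at hsplit
    simpa using hsplit.symm
  · right
    have h2 : (context.toList.dropWhile (fun c => decide (c ≠ '.'))) ≠ [] := by rw [hd]; simp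
    have h3 := List.head_dropWhile_not (p := fun c => decide (c ≠ '.')) (l := context.toList) h2
    simp only [hd] at h3
    have hc : c = '.' := by simpa using h3
    rw [hd, ← heq, hc] at hsplit
    exact ⟨r, hsplit.symm⟩

lemma canonical_main (context : String) :
    canonical_context context = canonical_context_alt context := by
  by_cases h1 : context = "examples2"
  · subst h1; rfl
  by_cases h2 : context = "primitives2"
  · subst h2; rfl
  by_cases h3 : context = "extra_tests2"
  · subst h3; rfl
  have hitems : canonical_context_remaps.items =
      [("examples2", "examples"), ("primitives2", "primitives"), ("extra_tests2", "extra_tests")] := by decide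
  have hc : canonical_context_remaps.contains context = false := by
    simp [PySem.Dict.contains, hitems]
    exact ⟨Ne.symm h1, Ne.symm h2, Ne.symm h3⟩
  rw [canonical_context, if_neg (by simp [hc])]
  by_cases p1 : PySem.Str.startswith context "examples2." = true
  · obtain ⟨r, hr⟩ := (PySem.Chars.startswith_iff _ _).1 (by rw [PySem.Str.startswith_eq] at p1; exact p1)
    have hcs : context.toList = "examples2.".toList ++ r := hr.symm
    rw [canonical_loop_hit context "examples2." _ r hcs p1,
      canonical_alt_hit context "examples2" "examples" r (by decide) (by rw [hcs]; rfl) (by decide)]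
    have hb : (canonical_context_remaps.get? (PySem.Str.slice "examples2." none (some (-1)))).getD ""
        = "examples" := by decide
    rw [hb]
    split_ifs
    · exact canonical_join "examples" r
    · rfl
  have q1 : PySem.Str.startswith context "examples2." = false := eq_false_of_ne_true p1
  by_cases p2 : PySem.Str.startswith context "primitives2." = true
  · obtain ⟨r, hr⟩ := (PySem.Chars.startswith_iff _ _).1 (by rw [PySem.Str.startswith_eq] at p2; exact p2)
    have hcs : context.toList = "primitives2.".toList ++ r := hr.symm
    rw [canonical_loop_miss context "examples2." _ q1]
    rw [canonical_loop_hit context "primitives2." _ r hcs p2,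
      canonical_alt_hit context "primitives2" "primitives" r (by decide) (by rw [hcs]; rfl) (by decide)]
    have hb : (canonical_context_remaps.get? (PySem.Str.slice "primitives2." none (some (-1)))).getD ""
        = "primitives" := by decide
    rw [hb]
    split_ifs
    · exact canonical_join "primitives" r
    · rfl
  have q2 : PySem.Str.startswith context "primitives2." = false := eq_false_of_ne_true p2
  by_cases p3 : PySem.Str.startswith context "extra_tests2." = true
  · obtain ⟨r, hr⟩ := (PySem.Chars.startswith_iff _ _).1 (by rw [PySem.Str.startswith_eq] at p3; exact p3)
    have hcs : context.toList = "extra_tests2.".toList ++ r := hr.symm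
    rw [canonical_loop_miss context "examples2." _ q1, canonical_loop_miss context "primitives2." _ q2]
    rw [canonical_loop_hit context "extra_tests2." _ r hcs p3,
      canonical_alt_hit context "extra_tests2" "extra_tests" r (by decide) (by rw [hcs]; rfl) (by decide)]
    have hb : (canonical_context_remaps.get? (PySem.Str.slice "extra_tests2." none (some (-1)))).getD ""
        = "extra_tests" := by decide
    rw [hb]
    split_ifs
    · exact canonical_join "extra_tests" r
    · rfl
  have q3 : PySem.Str.startswith context "extra_tests2." = false := eq_false_of_ne_true p3
  rw [canonical_loop_miss context "examples2." _ q1, canonical_loop_miss context "primitives2." _ q2,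
    canonical_loop_miss context "extra_tests2." _ q3,
    show canonical_context_loop context [] = context from rfl]
  symm
  -- the head of the partition matches no key, so B returns the input unchanged
  apply canonical_alt_id
  have hkey : ∀ key : String, key.toList = context.toList.takeWhile (fun c => c ≠ '.') →
      context ≠ key → PySem.Str.startswith context (key ++ ".") = false → False := by
    intro key hk hne hsw
    rcases canonical_span_cases context key hk with h | ⟨r, hr⟩
    · exact hne h
    · have : PySem.Str.startswith context (key ++ ".") = true := by
        rw [PySem.Str.startswith_eq]
        apply (PySem.Chars.startswith_iff _ _).2
        refine ⟨r, ?_⟩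
        rw [hr]
        simp
      rw [hsw] at this
      exact absurd this (by simp)
  have hitems2 : (PySem.Dict.ofList
      [("examples2", "examples"), ("primitives2", "primitives"), ("extra_tests2", "extra_tests")]
      : PySem.Dict String String).items =
      [("examples2", "examples"), ("primitives2", "primitives"), ("extra_tests2", "extra_tests")] := by decide
  simp [PySem.Dict.get?, hitems2]
  refine ⟨?_, ?_, ?_⟩ <;> intro heq
  · refine hkey "examples2" ?_ h1 q1
    have h := congrArg String.toList heq
    rw [String.toList_ofList] at h
    simpa [decide_not] using h
  · refine hkey "primitives2" ?_ h2 q2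
    have h := congrArg String.toList heq
    rw [String.toList_ofList] at h
    simpa [decide_not] using h
  · refine hkey "extra_tests2" ?_ h3 q3
    have h := congrArg String.toList heq
    rw [String.toList_ofList] at h
    simpa [decide_not] using h

-- ===== VERDICT (by name: the statement is the Claim_ definition above) =====
theorem canonical_context_spec : Claim_equal_canonical_context := by
  intro context _
  unfold Spec_canonical_context
  exact canonical_main context
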